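-- pv_equiv track=rewrite | github.com/HelloShagun/useful_libs | lake_maps_comparison/io_stack.py | index_of_band
-- ===== SOURCE A (Python) =====
-- from typing import Dict, List, Optional, Sequence, Tuple, Union
--
-- def index_of_band(band_desc: Sequence[str], name: str, aliases: Optional[Dict[str, Sequence[str]]] = None) -> int:
--     """
--     Find band index by exact match to name, or by aliases.
--
--     aliases example:
--       {"DW_Water": ["DW", "DynamicWorld", "DW_WATER"]}
--     """
--     if name in band_desc:
--         return list(band_desc).index(name)
--
--     if aliases and name in aliases:
--         for alt in aliases[name]:
--             if alt in band_desc: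
--                 return list(band_desc).index(alt)
--
--     raise KeyError(f"Band '{name}' not found. Available: {list(band_desc)}")
-- ===== SOURCE B (Python) =====
-- def index_of_band(band_desc, name, aliases=None):
--     # Different algorithm: assign each acceptable name a priority (name=0,
--     # then its aliases in order), then make ONE pass over band_desc keeping
--     # the position of the lowest-priority acceptable band seen first.
--     prio = {name: 0}
--     if aliases and name in aliases:
--         for a in aliases[name]:
--             if a not in prio:
--                 prio[a] = len(prio)
--     best = None  # (priority, index)
--     for i, b in enumerate(band_desc):
--         p = prio.get(b)
--         if p is not None and (best is None or p < best[0]):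
--             best = (p, i)
--     if best is None:
--         raise KeyError(f"Band '{name}' not found. Available: {list(band_desc)}")
--     return best[1]
-- ===== Notes on version B (the rewrite author's own statement) =====
-- stated objective: alternative
-- what changed: B assigns each acceptable name a priority (name=0, then aliases in order) in a dict and makes a single pass over band_desc keeping the position of the lowest-priority match, instead of A's per-candidate membership tests plus extra list.index scans.
import Mathlib
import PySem

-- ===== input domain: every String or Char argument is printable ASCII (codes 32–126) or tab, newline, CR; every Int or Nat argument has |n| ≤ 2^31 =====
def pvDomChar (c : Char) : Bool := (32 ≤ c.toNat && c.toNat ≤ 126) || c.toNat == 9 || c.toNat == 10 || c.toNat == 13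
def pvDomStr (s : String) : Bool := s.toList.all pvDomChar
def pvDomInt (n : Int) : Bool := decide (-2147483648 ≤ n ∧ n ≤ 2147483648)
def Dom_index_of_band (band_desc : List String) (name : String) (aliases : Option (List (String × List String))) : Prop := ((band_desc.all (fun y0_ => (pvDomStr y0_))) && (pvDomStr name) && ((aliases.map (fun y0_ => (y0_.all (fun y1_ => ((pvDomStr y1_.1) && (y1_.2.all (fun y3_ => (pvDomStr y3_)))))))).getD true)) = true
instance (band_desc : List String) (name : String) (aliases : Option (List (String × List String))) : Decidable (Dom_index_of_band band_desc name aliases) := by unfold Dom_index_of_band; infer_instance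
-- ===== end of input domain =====

-- ===== PORT A =====
-- B replaces A's candidate-by-candidate membership/index scans with a priority map plus
-- ONE pass over band_desc keeping the lowest-priority match (objective: alternative).
-- Where the Python A raises KeyError both ports return 0; Pre_ excludes exactly those inputs.

-- A's inner 'for alt in aliases[name]' loop (0 = the raising fall-through).
def pyFindAlt (band_desc : List String) : List String → Int
  | [] => 0
  | alt :: rest =>
    if alt ∈ band_desc then (((PySem.List.index? band_desc alt).getD 0 : Nat) : Int)
    else pyFindAlt band_desc rest

def index_of_band (band_desc : List String) (name : String) (aliases : Option (List (String × List String))) : Int :=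
  if name ∈ band_desc then (((PySem.List.index? band_desc name).getD 0 : Nat) : Int)
  else
    match aliases with
    | none => 0  -- 'aliases and …' is false; A raises (excluded by Pre_)
    | some al =>
      let d := PySem.Dict.ofList al
      if d.items ≠ [] ∧ d.contains name then pyFindAlt band_desc (d.getD name [])
      else 0  -- A raises (excluded by Pre_)

-- ===== PORT B =====
-- 'for a in aliases[name]: if a not in prio: prio[a] = len(prio)'
def buildPrio (alts : List String) (d : PySem.Dict String Int) : PySem.Dict String Int :=
  alts.foldl (fun d a => if d.contains a then d else d.insert a (d.items.length : Int)) d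

-- the body of 'for i, b in enumerate(band_desc): …' updating best
def bestStep (prio : PySem.Dict String Int) (best : Option (Int × Int)) (p : Int × String) : Option (Int × Int) :=
  match prio.get? p.2 with
  | none => best
  | some q =>
    match best with
    | none => some (q, p.1)
    | some b => if q < b.1 then some (q, p.1) else some b

def index_of_band_alt (band_desc : List String) (name : String) (aliases : Option (List (String × List String))) : Int :=
  let prio0 := PySem.Dict.empty.insert name (0 : Int)
  let prio :=
    match aliases with
    | none => prio0
    | some al =>
      let d := PySem.Dict.ofList al
      if d.items ≠ [] ∧ d.contains name then buildPrio (d.getD name []) prio0 else prio0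
  match (PySem.List.enumerate band_desc).foldl (bestStep prio) none with
  | none => 0  -- best is None: B raises the same KeyError (excluded by Pre_)
  | some b => b.2

-- ===== PRECONDITION & SPEC =====
-- Pre_ excludes exactly the inputs on which the Python A raises KeyError (no band matches
-- the name directly or via its aliases); B raises the identical KeyError there.
def Pre_index_of_band (band_desc : List String) (name : String) (aliases : Option (List (String × List String))) : Prop :=
  (decide (name ∈ band_desc) ||
    (match aliases with
     | none => false
     | some al =>
       !(PySem.Dict.ofList al).items.isEmpty && (PySem.Dict.ofList al).contains name &&
         ((PySem.Dict.ofList al).getD name []).any (fun alt => decide (alt ∈ band_desc)))) = true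
instance (band_desc : List String) (name : String) (aliases : Option (List (String × List String))) : Decidable (Pre_index_of_band band_desc name aliases) := by unfold Pre_index_of_band; infer_instance
def pvWitness_index_of_band : List String × String × (Option (List (String × List String))) :=
  (["B1", "B2"], "DW", some [("DW", ["B2", "B3"])])

def Spec_index_of_band (band_desc : List String) (name : String) (aliases : Option (List (String × List String))) (out : Int) : Prop := out = index_of_band_alt band_desc name aliases
instance (band_desc : List String) (name : String) (aliases : Option (List (String × List String))) (out : Int) : Decidable (Spec_index_of_band band_desc name aliases out) := by unfold Spec_index_of_band; infer_instance

-- ===== CLAIM (what is proved, stated in full; the proofs are below) =====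
def Claim_equal_index_of_band : Prop := ∀ (band_desc : List String) (name : String) (aliases : Option (List (String × List String))), Dom_index_of_band band_desc name aliases → Pre_index_of_band band_desc name aliases → Spec_index_of_band band_desc name aliases (index_of_band band_desc name aliases)

-- ===== LEMMAS AND PROOFS =====

-- the dedup step performed implicitly by prio's 'if a not in prio'
def dstep (L : List String) (a : String) : List String := if a ∈ L then L else L ++ [a]

-- items of the priority dict, as a function of its (nodup) key list
def toItems : List String → Nat → List (String × Int)
  | [], _ => []
  | x :: xs, n => (x, (n : Int)) :: toItems xs (n + 1)

-- merge of two best-candidates (left bias on equal priorities)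
def best2 (a b : Option (Int × Int)) : Option (Int × Int) :=
  match b with
  | none => a
  | some q =>
    match a with
    | none => b
    | some p => if q.1 < p.1 then b else a

-- the pure value of B's fold over band_desc
def pureBest (L : List String) : List String → Int → Option (Int × Int)
  | [], _ => none
  | x :: rest, s => best2 ((List.idxOf? x L).map (fun q => ((q : Int), s))) (pureBest L rest (s + 1))

theorem best2_none_left (b : Option (Int × Int)) : best2 none b = b := by cases b <;> rfl

theorem idxOf?_of_mem {a : String} {l : List String} (h : a ∈ l) :
    List.idxOf? a l = some (l.idxOf a) := by
  induction l with
  | nil => simp at h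
  | cons x xs ih =>
    by_cases hx : x = a
    · subst hx; simp [List.idxOf?_cons, List.idxOf_cons]
    · have : a ∈ xs := by simpa [hx, Ne.symm hx] using h
      simp [List.idxOf?_cons, List.idxOf_cons, hx, ih this]

theorem toItems_append (L M : List String) (n : Nat) :
    toItems (L ++ M) n = toItems L n ++ toItems M (n + L.length) := by
  induction L generalizing n with
  | nil => simp [toItems]
  | cons x xs ih => simp [toItems, ih, Nat.add_assoc, Nat.add_comm 1 xs.length]

theorem length_toItems (L : List String) (n : Nat) : (toItems L n).length = L.length := by
  induction L generalizing n with
  | nil => rfl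
  | cons x xs ih => simp [toItems, ih]

theorem find?_toItems (L : List String) (n : Nat) (c : String) :
    (toItems L n).find? (fun p => p.1 == c) = (List.idxOf? c L).map (fun i => (c, ((n + i : Nat) : Int))) := by
  induction L generalizing n with
  | nil => simp [toItems]
  | cons x xs ih =>
    by_cases hx : x = c
    · subst hx; simp [toItems, List.find?_cons, List.idxOf?_cons]
    · have hb : (x == c) = false := by simp [hx]
      simp only [toItems, List.find?_cons, hb, cond_false, List.idxOf?_cons, ih]
      cases List.idxOf? c xs <;> simp <;> omega

theorem buildPrio_items (alts L : List String) (d : PySem.Dict String Int)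
    (h : d.items = toItems L 0) :
    (buildPrio alts d).items = toItems (alts.foldl dstep L) 0 := by
  induction alts generalizing L d with
  | nil => simpa [buildPrio] using h
  | cons a rest ih =>
    have hcont : d.contains a = decide (a ∈ L) := by
      rw [PySem.Dict.contains_eq_isSome_get?, PySem.Dict.get?, h, find?_toItems]
      rcases hm : List.idxOf? a L with _ | k
      · simp [List.idxOf?_eq_none_iff.mp hm]
      · have : a ∈ L := by
          by_contra hc
          rw [List.idxOf?_eq_none_iff.mpr hc] at hm; cases hm
        simp [this]
    simp only [buildPrio, List.foldl_cons] at *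
    by_cases ha : a ∈ L
    · rw [hcont]
      simp only [ha, decide_true, if_true]
      have hstep : dstep L a = L := by simp [dstep, ha]
      rw [hstep]
      exact ih L d h
    · rw [hcont]
      simp only [ha, decide_false, Bool.false_eq_true, if_false]
      have hc : d.contains a = false := by rw [hcont]; simp [ha]
      have hins : (d.insert a (d.items.length : Int)).items = toItems (L ++ [a]) 0 := by
        simp only [PySem.Dict.items_insert, hc, Bool.false_eq_true, if_false]
        rw [h, toItems_append]
        simp [toItems, length_toItems]
      have hstep : dstep L a = L ++ [a] := by simp [dstep, ha]
      rw [hstep]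
      exact ih (L ++ [a]) _ hins

theorem get?_of_items (d : PySem.Dict String Int) (L : List String) (h : d.items = toItems L 0) (c : String) :
    d.get? c = (List.idxOf? c L).map (fun i => (i : Int)) := by
  rw [PySem.Dict.get?, h, find?_toItems]
  cases List.idxOf? c L <;> simp

theorem bestStep_eq (prio : PySem.Dict String Int) (b : Option (Int × Int)) (p : Int × String) :
    bestStep prio b p = best2 b ((prio.get? p.2).map (fun q => (q, p.1))) := by
  rcases h : prio.get? p.2 with _ | q <;> rcases b with _ | x <;> simp [bestStep, best2, h]

theorem best2_some_some (p q : Int × Int) :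
    best2 (some p) (some q) = if q.1 < p.1 then some q else some p := rfl

theorem best2_assoc (a b c : Option (Int × Int)) : best2 (best2 a b) c = best2 a (best2 b c) := by
  rcases a with _ | p
  · rw [best2_none_left, best2_none_left]
  · rcases b with _ | q
    · rcases c with _ | r <;> rfl
    · rcases c with _ | r
      · rfl
      · by_cases h1 : q.1 < p.1 <;> by_cases h2 : r.1 < q.1 <;> by_cases h3 : r.1 < p.1 <;>
          simp only [best2_some_some, h1, h2, h3, if_true, if_false] <;>
          first | rfl | omega

theorem foldl_bestStep (prio : PySem.Dict String Int) (L : List String)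
    (hprio : ∀ c, prio.get? c = (List.idxOf? c L).map (fun i => (i : Int))) :
    ∀ (xs : List String) (s : Int) (b : Option (Int × Int)),
      (PySem.List.enumerate xs s).foldl (bestStep prio) b = best2 b (pureBest L xs s) := by
  intro xs
  induction xs with
  | nil => intro s b; simp [PySem.List.enumerate, pureBest, best2]
  | cons x rest ih =>
    intro s b
    rw [PySem.List.enumerate_cons, List.foldl_cons, ih, bestStep_eq, hprio, pureBest, best2_assoc]
    congr 1
    cases List.idxOf? x L <;> rfl

theorem find?_first {p : String → Bool} {c : String} {L : List String}
    (hm : c ∈ L) (hp : p c = true) (hmin : ∀ c' ∈ L, p c' = true → L.idxOf c ≤ L.idxOf c') :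
    L.find? p = some c := by
  induction L with
  | nil => simp at hm
  | cons a L' ih =>
    by_cases hpa : p a = true
    · have hca : c = a := by
        by_contra hca
        have := hmin a (by simp) hpa
        rw [List.idxOf_cons, List.idxOf_cons] at this
        have hba : (a == c) = false := beq_eq_false_iff_ne.mpr (fun h => hca h.symm)
        simp [hba] at this
      subst hca
      simp [List.find?_cons, hpa]
    · have hca : c ≠ a := fun h => hpa (h ▸ hp)
      have hm' : c ∈ L' := by rcases List.mem_cons.mp hm with h | h; exact absurd h hca; exact h
      have hmin' : ∀ c' ∈ L', p c' = true → L'.idxOf c ≤ L'.idxOf c' := by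
        intro c' hc' hpc'
        have := hmin c' (List.mem_cons_of_mem a hc') hpc'
        have hba : (a == c) = false := beq_eq_false_iff_ne.mpr (fun h => hca h.symm)
        by_cases hca' : c' = a
        · exact absurd (hca' ▸ hpc') hpa
        · have hba' : (a == c') = false := beq_eq_false_iff_ne.mpr (fun h => hca' h.symm)
          rw [List.idxOf_cons, List.idxOf_cons, hba, hba'] at this
          simpa using this
      have hpaf : p a = false := by simpa using hpa
      simp [List.find?_cons, hpaf, ih hm' hmin']

theorem find?_min {p : String → Bool} {c : String} {L : List String}
    (h : L.find? p = some c) : ∀ c' ∈ L, p c' = true → L.idxOf c ≤ L.idxOf c' := by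
  induction L with
  | nil => simp at h
  | cons a L' ih =>
    intro c' hc' hpc'
    by_cases hpa : p a = true
    · rw [List.find?_cons] at h
      simp [hpa] at h
      subst h
      simp [List.idxOf_cons]
    · have hpaf : p a = false := by simpa using hpa
      have h : L'.find? p = some c := by simpa [List.find?_cons, hpaf] using h
      have hca : c ≠ a := by
        intro hh
        exact hpa (hh ▸ (List.find?_some h))
      have hca' : c' ≠ a := fun hh => hpa (hh ▸ hpc')
      have hm' : c' ∈ L' := by rcases List.mem_cons.mp hc' with hh | hh; exact absurd hh hca'; exact hh
      have hba : (a == c) = false := beq_eq_false_iff_ne.mpr (fun h => hca h.symm)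
      have hba' : (a == c') = false := beq_eq_false_iff_ne.mpr (fun h => hca' h.symm)
      rw [List.idxOf_cons, List.idxOf_cons, hba, hba']
      simpa using ih h c' hm' hpc'

theorem find?_congr' {p q : String → Bool} {L : List String}
    (h : ∀ c ∈ L, p c = q c) : L.find? p = L.find? q := by
  induction L with
  | nil => rfl
  | cons a L' ih =>
    rw [List.find?_cons, List.find?_cons, h a (by simp), ih (fun c hc => h c (List.mem_cons_of_mem a hc))]

theorem pureBest_char (L : List String) (hnd : L.Nodup) :
    ∀ (xs : List String) (s : Int),
      pureBest L xs s =
        match L.find? (fun c => decide (c ∈ xs)) with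
        | none => none
        | some c => some (((L.idxOf c : Nat) : Int), s + ((xs.idxOf c : Nat) : Int)) := by
  intro xs
  induction xs with
  | nil =>
    intro s
    rw [List.find?_eq_none.mpr (by intro c _; simp)]
    rfl
  | cons x rest ih =>
    intro s
    rw [show pureBest L (x :: rest) s
          = best2 ((List.idxOf? x L).map (fun q => ((q : Int), s))) (pureBest L rest (s + 1)) from rfl,
        ih (s + 1)]
    by_cases hx : x ∈ L
    · rw [idxOf?_of_mem hx]
      rcases hfr : L.find? (fun c => decide (c ∈ rest)) with _ | c'
      · have hnone : ∀ c ∈ L, c ∉ rest := by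
          intro c hc hcr
          have := List.find?_eq_none.mp hfr c hc
          simp [hcr] at this
        have hfind : L.find? (fun c => decide (c ∈ x :: rest)) = some x := by
          apply find?_first hx (by simp)
          intro c'' hc'' hp
          rcases List.mem_cons.mp (of_decide_eq_true hp) with h | h
          · rw [h]
          · exact absurd h (hnone c'' hc'')
        rw [hfind]
        simp [best2, List.idxOf_cons_self]
      · have hc'L : c' ∈ L := List.mem_of_find?_eq_some hfr
        have hc'r : c' ∈ rest := by have := List.find?_some hfr; simpa using this
        have hmin := find?_min hfr
        by_cases hlt : L.idxOf c' < L.idxOf x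
        · have hne : c' ≠ x := by rintro rfl; omega
          have hfind : L.find? (fun c => decide (c ∈ x :: rest)) = some c' := by
            apply find?_first hc'L (by simp [hc'r])
            intro c'' hc'' hp
            rcases List.mem_cons.mp (of_decide_eq_true hp) with h | h
            · exact h ▸ le_of_lt hlt
            · exact hmin c'' hc'' (by simp [h])
          rw [hfind]
          have hbx : (x == c') = false := beq_eq_false_iff_ne.mpr (Ne.symm hne)
          have hidx : (x :: rest).idxOf c' = rest.idxOf c' + 1 := by
            rw [List.idxOf_cons, hbx, cond_false]
          have hcast : (((L.idxOf c' : Nat) : Int) < ((L.idxOf x : Nat) : Int)) := by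
            exact_mod_cast hlt
          simp [best2_some_some, hcast]
          omega
        · have hfind : L.find? (fun c => decide (c ∈ x :: rest)) = some x := by
            apply find?_first hx (by simp)
            intro c'' hc'' hp
            rcases List.mem_cons.mp (of_decide_eq_true hp) with h | h
            · exact h ▸ le_refl _
            · exact le_trans (Nat.le_of_not_lt hlt) (hmin c'' hc'' (by simp [h]))
          rw [hfind]
          have hcast : ¬ (((L.idxOf c' : Nat) : Int) < ((L.idxOf x : Nat) : Int)) := by
            exact_mod_cast hlt
          simp [best2_some_some, hcast, List.idxOf_cons_self]
    · rw [List.idxOf?_eq_none_iff.mpr hx]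
      have hcong : L.find? (fun c => decide (c ∈ x :: rest)) = L.find? (fun c => decide (c ∈ rest)) := by
        apply find?_congr'
        intro c hc
        have hcx : c ≠ x := fun h => hx (h ▸ hc)
        simp [List.mem_cons, hcx]
      rw [hcong]
      rcases hfr : L.find? (fun c => decide (c ∈ rest)) with _ | c'
      · simp [best2]
      · have hc'L : c' ∈ L := List.mem_of_find?_eq_some hfr
        have hne : c' ≠ x := fun h => hx (h ▸ hc'L)
        have hbx : (x == c') = false := beq_eq_false_iff_ne.mpr (Ne.symm hne)
        have hidx : (x :: rest).idxOf c' = rest.idxOf c' + 1 := by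
          rw [List.idxOf_cons, hbx, cond_false]
        simp [best2]
        omega

theorem dedup_find? (p : String → Bool) :
    ∀ (alts L : List String), (alts.foldl dstep L).find? p = (L.find? p).or (alts.find? p) := by
  intro alts
  induction alts with
  | nil => intro L; cases h : L.find? p <;> simp [h]
  | cons a rest ih =>
    intro L
    rw [List.foldl_cons]
    by_cases ha : a ∈ L
    · rw [show dstep L a = L from by simp [dstep, ha], ih]
      rcases hL : L.find? p with _ | c
      · have hpa : p a = false := by
          have := List.find?_eq_none.mp hL a ha
          simpa using this
        simp [List.find?_cons, hpa]
      · simp [hL]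
    · rw [show dstep L a = L ++ [a] from by simp [dstep, ha], ih, List.find?_append]
      rw [Option.or_assoc]
      congr 1
      rw [List.find?_cons]
      cases hpa : p a <;> simp [List.find?_cons, hpa]

theorem dedup_nodup : ∀ (alts L : List String), L.Nodup → (alts.foldl dstep L).Nodup := by
  intro alts
  induction alts with
  | nil => intro L h; simpa
  | cons a rest ih =>
    intro L h
    rw [List.foldl_cons]
    by_cases ha : a ∈ L
    · rw [show dstep L a = L from by simp [dstep, ha]]; exact ih L h
    · rw [show dstep L a = L ++ [a] from by simp [dstep, ha]]
      refine ih _ ?_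
      have hd : ∀ b ∈ L, ¬ b = a := fun b hb he => ha (he ▸ hb)
      simp only [List.nodup_append, List.nodup_cons]
      simp [h]
      exact hd

theorem pyFindAlt_eq_find? (band_desc : List String) (M : List String) :
    pyFindAlt band_desc M =
      match M.find? (fun c => decide (c ∈ band_desc)) with
      | none => 0
      | some c => (((PySem.List.index? band_desc c).getD 0 : Nat) : Int) := by
  induction M with
  | nil => rfl
  | cons alt rest ih =>
    rw [pyFindAlt, List.find?_cons]
    by_cases h : alt ∈ band_desc
    · simp [h]
    · simp [h, ih]

theorem idx_val {c : String} {xs : List String} (h : c ∈ xs) :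
    (((PySem.List.index? xs c).getD 0 : Nat) : Int) = ((xs.idxOf c : Nat) : Int) := by
  rw [PySem.List.index?_eq_idxOf?, idxOf?_of_mem h]
  rfl

-- the two ports agree, stated for a common effective alias list
theorem main_eq (band_desc : List String) (name : String) (effAlts : List String) :
    (if name ∈ band_desc then (((PySem.List.index? band_desc name).getD 0 : Nat) : Int)
     else pyFindAlt band_desc effAlts)
    = (match (PySem.List.enumerate band_desc).foldl
          (bestStep (buildPrio effAlts (PySem.Dict.empty.insert name (0 : Int)))) none with
       | none => 0
       | some b => b.2) := by
  have hitems : (buildPrio effAlts (PySem.Dict.empty.insert name (0 : Int))).items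
      = toItems (effAlts.foldl dstep [name]) 0 := by
    apply buildPrio_items
    rfl
  have hprio := get?_of_items _ _ hitems
  rw [foldl_bestStep _ _ hprio band_desc 0 none, best2_none_left,
      pureBest_char _ (dedup_nodup effAlts [name] (by simp)) band_desc 0,
      dedup_find?]
  by_cases hn : name ∈ band_desc
  · have h1 : List.find? (fun c => decide (c ∈ band_desc)) [name] = some name := by
      simp [List.find?_cons, hn]
    rw [if_pos hn, h1, idx_val hn]
    simp
  · have h1 : List.find? (fun c => decide (c ∈ band_desc)) [name] = none := by
      simp [List.find?_cons, hn]
    rw [if_neg hn, h1, Option.none_or, pyFindAlt_eq_find?]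
    rcases hf : effAlts.find? (fun c => decide (c ∈ band_desc)) with _ | c
    · rfl
    · have h2 := List.find?_some hf
      have hc : c ∈ band_desc := by simpa using h2
      simp [idxOf?_of_mem hc]

-- ===== VERDICT (by name: the statement is the Claim_ definition above) =====
theorem index_of_band_spec : Claim_equal_index_of_band := by
  intro band_desc name aliases _ _
  show index_of_band band_desc name aliases = index_of_band_alt band_desc name aliases
  rw [index_of_band.eq_def, index_of_band_alt.eq_def]
  cases aliases with
  | none =>
    have := main_eq band_desc name []
    simp only [pyFindAlt, buildPrio, List.foldl_nil] at this
    by_cases hn : name ∈ band_desc <;> simp only [hn, if_true, if_false] <;> simpa [hn] using this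
  | some al =>
    by_cases hn : name ∈ band_desc
    · have := main_eq band_desc name
        (if (PySem.Dict.ofList al).items ≠ [] ∧ (PySem.Dict.ofList al).contains name
         then (PySem.Dict.ofList al).getD name [] else [])
      simp only [hn, if_true] at this ⊢
      split_ifs at this ⊢ with hcond
      · simpa using this
      · simpa [buildPrio] using this
    · simp only [hn, if_false]
      split_ifs with hcond
      · have := main_eq band_desc name ((PySem.Dict.ofList al).getD name [])
        rw [if_neg hn] at this
        simpa [hcond] using this
      · have := main_eq band_desc name []
        rw [if_neg hn] at this
        simpa [buildPrio, pyFindAlt, hcond] using this
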